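/- GENERATED by mk_final_copies.py from the proof of the farm's unit `start_decoder.C4c` (farm:start_decoder.C4c.1: Lemmas.lean) as the
   re-elaboration sweep compiled it — do not edit. -/
import Vorbis.Spec.Reader
import Vorbis.Spec.Units.start_decoder_C4c

open X86 X86.User Asan Vorbis Vorbis.Spec Vorbis.Spec.StartDecoder

set_option maxRecDepth 4000
set_option maxHeartbeats 4000000

namespace Vorbis.Spec.start_decoder_C4c

/-- **`InC4Err` AT THE RETURN OF `error`** after the byte store into `lengths[j]`: from `InC4Mid` at the segment's entry state `v`,
the ONE `Agree` whose array window is the byte `[lengths + j, lengths + j + 1)` (the pushes below `R`, the stored byte, error's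
`[f + 140, f + 144)` inside Agree's window `[f + 136, f + 144)`), `Bits` in the new memory, `rax = 0` of error's post. `Frame` by
`C4.frame_carry`, `Failed` by `(C4.cur_carry …).failed`. -/
theorem c4c_err_exit {u₀ : State} {g : Ghost} {pc : Word} {i : Nat} {A2 A3 Ai : Arena} {A : Arena × List Obj}
    {lengths E j : Nat} {v w : State} (hat : InC4Mid u₀ g i A2 A3 Ai A lengths E j pc v)
    (hag : C4.Agree g.R g.f (lengths + j) 1 v.mem w.mem) (hbits : Bits (g.Blk A) g.len w.mem g.f)
    (hrip : w.rip = Vorbis.L.start_decoder.cut124) (hrsp : w.reg .rsp = v.reg .rsp) (hinv : abiInv w)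
    (h14 : w.reg .r14 = v.reg .r14) (hrax : w.reg .rax = 0) : InC4Err u₀ g A w := by
  have hfr := hat.frame
  have hcur := hat.cur
  have ha := hcur.sd.arena
  have hb := ha.bounds
  have hout := hcur.hand.objOut
  simp only [voff] at hout
  have hobr := hcur.sd.bits.OBR
  simp only [voff] at hobr
  have hglob := hcur.hand.outside ⟨0x120640, 16⟩ (by
    unfold fixedBlocks globalBlocks
    apply List.mem_cons_of_mem
    apply List.mem_cons_of_mem
    apply List.mem_cons_of_mem
    apply List.mem_cons_of_mem
    exact List.mem_cons_self)
  simp only at hglob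
  obtain ⟨hr1, hr2⟩ := hfr.r_eq
  obtain ⟨ha1, ha2, ha3⟩ := hfr.ra
  simp only [steady, depth] at hr1 ha2
  obtain ⟨w1, w2, w3, w4⟩ := C4.lengths_where ha (fun B hB => hB.1) hat.place
  have hE : (Codebook.entries v.mem (g.cb v.mem i)).toNat = E := hat.ent
  have hjE := hat.j_lt
  rw [hE] at w2 w3 w4
  have hLs : lengths + j + 1 ≤ 0x700000 ∨ 0x800000 ≤ lengths + j := by omega
  have hLt : lengths + j + 1 ≤ 0xC00000 := by omega
  have hLf : lengths + j + 1 ≤ g.f ∨ g.f + 1808 ≤ lengths + j := by omega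
  have hLa : ∀ B, Ai.Blk B → B.base + B.size ≤ lengths + j ∨ lengths + j + 1 ≤ B.base := by
    intro B hB
    have hap := C4.lengths_apart ha hcur.ages.exti hat.place B hB
    rw [hE] at hap
    omega
  have hLg : lengths + j + 1 ≤ Vorbis.Globals.log2_4.beg ∨ Vorbis.Globals.log2_4.beg + 16 ≤ lengths + j := by
    simp only [Vorbis.Globals.log2_4]
    omega
  have hfr' : Frame u₀ g Vorbis.L.start_decoder.cut124 A w :=
    C4.frame_carry hfr hcur.hand hobr ha hag hrip hrsp hinv hLs hLt hLf ⟨by omega, by omega⟩ hLg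
  have hcur' : Cur g i A2 A3 Ai A w := C4.cur_carry hfr hcur hag hbits h14 hLs hLt hLf hLa
  exact
    { frame := hfr'
      hand := hcur.hand
      rax0 := by rw [hrax]; rfl
      failed := hcur'.failed }

end Vorbis.Spec.start_decoder_C4c
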